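-- pv_equiv track=rewrite | github.com/peter6888/dl_lab | dp_study.py | q2_zigzag
-- ===== SOURCE A (Python) =====
-- def q2_zigzag(a):
--     '''
--     find max length of zigzag list
--     Args:
--         a: list(int)
--     Returns: the max length
--     '''
--     n = len(a)
--     if n in [0,1,2]:
--         return n
--
--     ans = [2 for _ in range(n)]
--     ans[0], ans[1] = 1, 2
--
--     for i in range(2, n):
--         for j in range(1, i):
--             if (a[j] - a[j-1]) * (a[i] - a[j]) < 0 and \
--                                     ans[j] + 1 > ans[i]:
--                 ans[i] = ans[j] + 1
--     return ans[-1]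
-- ===== SOURCE B (Python) =====
-- def q2_zigzag(a):
--     n = len(a)
--     if n in [0, 1, 2]:
--         return n
--     memo = {}
--
--     def f(i):
--         if i in memo:
--             return memo[i]
--         if i == 0:
--             r = 1
--         elif i == 1:
--             r = 2
--         else:
--             r = 2
--             for j in range(1, i):
--                 if (a[j] - a[j - 1]) * (a[i] - a[j]) < 0:
--                     r = max(r, f(j) + 1)
--         memo[i] = r
--         return r
--
--     return f(n - 1)
-- ===== Notes on version B (the rewrite author's own statement) =====
-- stated objective: alternative
-- what changed: Replaces the bottom-up table-filling DP over an ans array with a top-down memoized recursion f(i) (zigzag length ending at i) that takes max(2, f(j)+1) over valid j and returns f(n-1).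
import Mathlib
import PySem

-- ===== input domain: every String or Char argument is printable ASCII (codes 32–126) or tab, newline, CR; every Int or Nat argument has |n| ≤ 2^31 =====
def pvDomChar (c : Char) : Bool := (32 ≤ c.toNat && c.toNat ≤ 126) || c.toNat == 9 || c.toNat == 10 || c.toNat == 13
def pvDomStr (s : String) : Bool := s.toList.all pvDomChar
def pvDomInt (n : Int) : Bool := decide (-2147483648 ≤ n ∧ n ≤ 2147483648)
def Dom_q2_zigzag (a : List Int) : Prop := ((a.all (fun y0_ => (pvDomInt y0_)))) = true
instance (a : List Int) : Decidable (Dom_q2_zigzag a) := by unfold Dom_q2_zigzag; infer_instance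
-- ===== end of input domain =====

-- B replaces A's bottom-up table DP with a top-down memoized recursion f(i) = zigzag length ending at i (alternative decomposition, same O(n^2) cost).
-- ===== PORT A =====
def q2_zigzag (a : List Int) : Int :=
  let n := a.length
  if n = 0 ∨ n = 1 ∨ n = 2 then (n : Int)
  else
    let ans0 : List Int := 1 :: 2 :: List.replicate (n - 2) 2
    let ans :=
      (List.range' 2 (n - 2)).foldl (fun ans i =>
        (List.range' 1 (i - 1)).foldl (fun ans j =>
          if (a.getD j 0 - a.getD (j - 1) 0) * (a.getD i 0 - a.getD j 0) < 0 ∧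
              ans.getD j 0 + 1 > ans.getD i 0
          then ans.set i (ans.getD j 0 + 1) else ans) ans) ans0
    ans.getD (n - 1) 0

-- ===== PORT B =====
-- f from Source B: plain recursion on the index (the memo dict in Source B only caches values, it never changes them)
def q2_zigzagF (a : List Int) : Nat → Int
  | 0 => 1
  | 1 => 2
  | (i + 2) =>
    (List.range' 1 (i + 1)).attach.foldl
      (fun r j =>
        if (a.getD j.1 0 - a.getD (j.1 - 1) 0) * (a.getD (i + 2) 0 - a.getD j.1 0) < 0
        then max r (q2_zigzagF a j.1 + 1) else r) 2
  decreasing_by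
    have h := (List.mem_range'_1.mp j.2).2
    omega

def q2_zigzag_alt (a : List Int) : Int :=
  let n := a.length
  if n = 0 ∨ n = 1 ∨ n = 2 then (n : Int)
  else q2_zigzagF a (n - 1)

-- ===== PRECONDITION & SPEC =====
def Spec_q2_zigzag (a : List Int) (out : Int) : Prop := out = q2_zigzag_alt a
instance (a : List Int) (out : Int) : Decidable (Spec_q2_zigzag a out) := by unfold Spec_q2_zigzag; infer_instance

-- ===== CLAIM (what is proved, stated in full; the proofs are below) =====
def Claim_equal_q2_zigzag : Prop := ∀ (a : List Int), Dom_q2_zigzag a → Spec_q2_zigzag a (q2_zigzag a)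

-- ===== LEMMAS AND PROOFS =====

-- A's inner-loop body (the literal lambda from the port of A), named for the lemmas
def pvAstep (a : List Int) (i : Nat) : List Int → Nat → List Int := fun ans j =>
  if (a.getD j 0 - a.getD (j - 1) 0) * (a.getD i 0 - a.getD j 0) < 0 ∧
      ans.getD j 0 + 1 > ans.getD i 0
  then ans.set i (ans.getD j 0 + 1) else ans

-- B's fold body, named
def pvBstep (a : List Int) (i : Nat) : Int → Nat → Int := fun r j =>
  if (a.getD j 0 - a.getD (j - 1) 0) * (a.getD i 0 - a.getD j 0) < 0
  then max r (q2_zigzagF a j + 1) else r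

theorem pvF_succ (a : List Int) (i : Nat) :
    q2_zigzagF a (i + 2) = (List.range' 1 (i + 1)).foldl (pvBstep a (i + 2)) 2 := by
  rw [q2_zigzagF]
  exact List.foldl_attach (f := pvBstep a (i + 2))

theorem pv_inner (a : List Int) (i : Nat) (js : List Nat) :
    ∀ (ans : List Int), i < ans.length →
    (∀ j ∈ js, j < i) →
    (∀ j, j < i → ans.getD j 0 = q2_zigzagF a j) →
    (js.foldl (pvAstep a i) ans).length = ans.length ∧
    (∀ k, k ≠ i → (js.foldl (pvAstep a i) ans).getD k 0 = ans.getD k 0) ∧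
    (js.foldl (pvAstep a i) ans).getD i 0 = js.foldl (pvBstep a i) (ans.getD i 0) := by
  induction js with
  | nil => intro ans _ _ _; exact ⟨rfl, fun _ _ => rfl, rfl⟩
  | cons j js ih =>
    intro ans hi hmem hlow
    have hj : j < i := hmem j (List.mem_cons_self ..)
    have hFj : ans.getD j 0 = q2_zigzagF a j := hlow j hj
    by_cases hc : (a.getD j 0 - a.getD (j - 1) 0) * (a.getD i 0 - a.getD j 0) < 0
    · by_cases hgt : ans.getD j 0 + 1 > ans.getD i 0
      · -- A updates ans[i]
        have hstep : pvAstep a i ans j = ans.set i (ans.getD j 0 + 1) := by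
          unfold pvAstep; rw [if_pos ⟨hc, hgt⟩]
        have hlen : (ans.set i (ans.getD j 0 + 1)).length = ans.length := List.length_set ..
        have hne : ∀ k, k ≠ i → (ans.set i (ans.getD j 0 + 1)).getD k 0 = ans.getD k 0 := by
          intro k hk
          simp [List.getD, List.getElem?_set_ne (Ne.symm hk)]
        have hati : (ans.set i (ans.getD j 0 + 1)).getD i 0 = ans.getD j 0 + 1 := by
          simp [List.getD, List.getElem?_set_self hi]
        obtain ⟨l1, l2, l3⟩ := ih (ans.set i (ans.getD j 0 + 1)) (by omega)
          (fun j' hj' => hmem j' (List.mem_cons_of_mem _ hj'))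
          (fun j' hj' => by rw [hne j' (by omega)]; exact hlow j' hj')
        refine ⟨?_, ?_, ?_⟩
        · simp only [List.foldl_cons, hstep, l1, hlen]
        · intro k hk
          simp only [List.foldl_cons, hstep]
          rw [l2 k hk, hne k hk]
        · simp only [List.foldl_cons, hstep]
          rw [l3, hati]
          congr 1
          simp only [pvBstep]
          rw [if_pos hc, ← hFj]
          exact (max_eq_right (le_of_lt hgt)).symm
      · -- condition holds but no improvement: A leaves ans, B's max is r
        have hstep : pvAstep a i ans j = ans := by
          unfold pvAstep; rw [if_neg (fun h => hgt h.2)]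
        obtain ⟨l1, l2, l3⟩ := ih ans hi (fun j' hj' => hmem j' (List.mem_cons_of_mem _ hj')) hlow
        refine ⟨?_, ?_, ?_⟩
        · simp only [List.foldl_cons, hstep, l1]
        · intro k hk; simp only [List.foldl_cons, hstep]; exact l2 k hk
        · simp only [List.foldl_cons, hstep]
          rw [l3]
          congr 1
          simp only [pvBstep]
          rw [if_pos hc, ← hFj]
          exact (max_eq_left (by omega)).symm
    · have hstep : pvAstep a i ans j = ans := by
        unfold pvAstep; rw [if_neg (fun h => hc h.1)]
      obtain ⟨l1, l2, l3⟩ := ih ans hi (fun j' hj' => hmem j' (List.mem_cons_of_mem _ hj')) hlow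
      refine ⟨?_, ?_, ?_⟩
      · simp only [List.foldl_cons, hstep, l1]
      · intro k hk; simp only [List.foldl_cons, hstep]; exact l2 k hk
      · simp only [List.foldl_cons, hstep]
        rw [l3]
        congr 1
        simp only [pvBstep]
        rw [if_neg hc]

def pvAns0 (a : List Int) : List Int := 1 :: 2 :: List.replicate (a.length - 2) 2

theorem pv_outer (a : List Int) (m : Nat) (hm : m + 2 ≤ a.length) :
    ((List.range' 2 m).foldl (fun ans i => (List.range' 1 (i - 1)).foldl (pvAstep a i) ans)
        (pvAns0 a)).length = a.length ∧
    (∀ j, j < m + 2 →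
      ((List.range' 2 m).foldl (fun ans i => (List.range' 1 (i - 1)).foldl (pvAstep a i) ans)
        (pvAns0 a)).getD j 0 = q2_zigzagF a j) ∧
    (∀ j, m + 2 ≤ j → j < a.length →
      ((List.range' 2 m).foldl (fun ans i => (List.range' 1 (i - 1)).foldl (pvAstep a i) ans)
        (pvAns0 a)).getD j 0 = 2) := by
  induction m with
  | zero =>
    refine ⟨by simp [pvAns0]; omega, ?_, ?_⟩
    · intro j hj
      interval_cases j
      · simp [pvAns0, List.getD, q2_zigzagF]
      · simp [pvAns0, List.getD, q2_zigzagF]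
    · intro j h2 hn
      obtain ⟨k, rfl⟩ : ∃ k, j = k + 2 := ⟨j - 2, by omega⟩
      simp only [pvAns0, List.getD]
      simp [List.getElem?_replicate]
      rw [if_pos (by omega : k < a.length - 2)]
      rfl
  | succ m ih =>
    obtain ⟨l1, l2, l3⟩ := ih (by omega)
    have hsplit : List.range' 2 (m + 1) = List.range' 2 m ++ [2 + m] := by
      simpa using List.range'_concat (s := 2) (n := m) (step := 1)
    have hi : (2 + m) - 1 = m + 1 := by omega
    obtain ⟨i1, i2, i3⟩ := pv_inner a (2 + m) (List.range' 1 (m + 1)) _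
      (by rw [l1]; omega)
      (fun j hj => by have := List.mem_range'_1.mp hj; omega)
      (fun j hj => l2 j (by omega))
    rw [hsplit]
    simp only [List.foldl_append, List.foldl_cons, List.foldl_nil, hi] at *
    refine ⟨by rw [i1, l1], ?_, ?_⟩
    · intro j hj
      by_cases hji : j = 2 + m
      · subst hji
        rw [i3, l3 (2 + m) (by omega) (by omega)]
        have : 2 + m = m + 2 := by omega
        rw [this, pvF_succ]
      · rw [i2 j hji, l2 j (by omega)]
    · intro j h2 hn
      rw [i2 j (by omega), l3 j (by omega) hn]


-- ===== VERDICT (by name: the statement is the Claim_ definition above) =====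
theorem q2_zigzag_spec : Claim_equal_q2_zigzag := by
  intro a _
  simp only [Spec_q2_zigzag, q2_zigzag, q2_zigzag_alt]
  by_cases h0 : a.length = 0 ∨ a.length = 1 ∨ a.length = 2
  · rw [if_pos h0, if_pos h0]
  · rw [if_neg h0, if_neg h0]
    obtain ⟨l1, l2, l3⟩ := pv_outer a (a.length - 2) (by omega)
    exact l2 (a.length - 1) (by omega)
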